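-- pv_equiv track=rewrite | github.com/WolphenOP/repo-syntra | loopdata.py | afstand_per_dag
-- ===== SOURCE A (Python) =====
-- def afstand_per_dag(afstanden):
--     dagen = max(len(a) for a in afstanden)  # Max aantal dagen
--     totalen_per_dag = [0] * dagen
--
--     for dag in range(dagen):
--         for afstanden_loper in afstanden:
--             if dag < len(afstanden_loper):
--                 totalen_per_dag[dag] += afstanden_loper[dag]
--
--     return totalen_per_dag
-- ===== SOURCE B (Python) =====
-- def _voeg_toe(totalen, loper):
--     kort = min(len(totalen), len(loper))
--     samen = [totalen[i] + loper[i] for i in range(kort)]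
--     return samen + totalen[kort:] + loper[kort:]
--
--
-- def afstand_per_dag(afstanden):
--     totalen = []
--     for loper in afstanden:
--         totalen = _voeg_toe(totalen, loper)
--     return totalen
-- ===== Notes on version B (the rewrite author's own statement) =====
-- stated objective: alternative
-- what changed: B makes a single runner-major pass, merging each runner's list into the running totals by pointwise addition (extending the totals as needed), instead of A's day-major nested loops over range(max length) with a bounds check per element.
-- outside the precondition, e.g. on afstand_per_dag([]): A raises ValueError, B returns []
import Mathlib
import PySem

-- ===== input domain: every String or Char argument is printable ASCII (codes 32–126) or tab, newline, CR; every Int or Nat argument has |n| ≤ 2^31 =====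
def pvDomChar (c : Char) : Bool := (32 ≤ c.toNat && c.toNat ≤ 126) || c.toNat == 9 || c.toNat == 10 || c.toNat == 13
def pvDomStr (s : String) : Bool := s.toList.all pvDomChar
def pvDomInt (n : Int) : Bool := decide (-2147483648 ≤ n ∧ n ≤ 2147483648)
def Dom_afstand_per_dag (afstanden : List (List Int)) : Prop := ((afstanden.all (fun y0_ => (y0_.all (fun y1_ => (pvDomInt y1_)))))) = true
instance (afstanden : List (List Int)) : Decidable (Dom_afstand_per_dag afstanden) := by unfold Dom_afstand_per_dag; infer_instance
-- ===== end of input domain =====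

-- B replaces A's day-major nested loops (over range(max length), with a per-element
-- bounds check) by a single runner-major pass that merges each runner's list into the
-- running totals by pointwise addition.

-- ===== PORT A =====
def afstand_per_dag (afstanden : List (List Int)) : List Int :=
  match PySem.List.max? (afstanden.map (fun a => (a.length : Int))) (fun x => x) with
  | none => []  -- Python raises ValueError here (max of empty); excluded by Pre_
  | some dagen =>
    (PySem.List.pyRange 0 dagen 1).foldl
      (fun tot dag =>
        afstanden.foldl
          (fun tot afstanden_loper =>
            if dag < (afstanden_loper.length : Int) then
              PySem.List.pySetD tot dag
                (PySem.List.pyGetD tot dag 0 + PySem.List.pyGetD afstanden_loper dag 0)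
            else tot)
          tot)
      (List.replicate dagen.toNat 0)

-- ===== PORT B =====
def voegToe (totalen loper : List Int) : List Int :=
  let kort : Int := min (totalen.length : Int) (loper.length : Int)
  let samen := (PySem.List.pyRange 0 kort 1).map
    (fun i => PySem.List.pyGetD totalen i 0 + PySem.List.pyGetD loper i 0)
  samen ++ PySem.List.slice totalen (some kort) none ++ PySem.List.slice loper (some kort) none

def afstand_per_dag_alt (afstanden : List (List Int)) : List Int :=
  afstanden.foldl voegToe []

-- ===== PRECONDITION & SPEC =====
-- Pre_ excludes only the empty input, on which Python A raises ValueError (max() of an empty sequence).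
def Pre_afstand_per_dag (afstanden : List (List Int)) : Prop := afstanden ≠ []
instance (afstanden : List (List Int)) : Decidable (Pre_afstand_per_dag afstanden) := by unfold Pre_afstand_per_dag; infer_instance
def pvWitness_afstand_per_dag : List (List Int) := [[1, 2, 3], [4, 5]]

def Spec_afstand_per_dag (afstanden : List (List Int)) (out : List Int) : Prop := out = afstand_per_dag_alt afstanden
instance (afstanden : List (List Int)) (out : List Int) : Decidable (Spec_afstand_per_dag afstanden out) := by unfold Spec_afstand_per_dag; infer_instance

-- ===== CLAIM (what is proved, stated in full; the proofs are below) =====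
def Claim_equal_afstand_per_dag : Prop := ∀ (afstanden : List (List Int)), Dom_afstand_per_dag afstanden → Pre_afstand_per_dag afstanden → Spec_afstand_per_dag afstanden (afstand_per_dag afstanden)

-- ===== LEMMAS AND PROOFS =====

/-- the column sum at day `d` over all runners (missing days count 0) -/
def colsum (afstanden : List (List Int)) (d : Nat) : Int :=
  (afstanden.map (fun l => l.getD d 0)).sum

theorem voegToe_eq (t l : List Int) :
    voegToe t l = (List.range (min t.length l.length)).map (fun k => t.getD k 0 + l.getD k 0)
      ++ t.drop (min t.length l.length) ++ l.drop (min t.length l.length) := by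
  simp only [voegToe, ← Nat.cast_min]
  rw [PySem.List.slice_from_natCast, PySem.List.slice_from_natCast, PySem.List.pyRange_one]
  simp [List.map_map, Function.comp_def]
  rw [← Nat.cast_min, Int.toNat_natCast]

theorem voegToe_length (t l : List Int) : (voegToe t l).length = max t.length l.length := by
  rw [voegToe_eq]
  simp
  omega

theorem voegToe_getD (t l : List Int) (d : Nat) :
    (voegToe t l).getD d 0 = t.getD d 0 + l.getD d 0 := by
  rw [voegToe_eq]
  set K := min t.length l.length with hK
  simp only [List.getD, List.append_assoc]
  rcases Nat.lt_or_ge d K with hd | hd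
  · rw [List.getElem?_append_left (by simpa using hd)]
    simp [hd]
  · rw [List.getElem?_append_right (by simpa using hd)]
    simp only [List.length_map, List.length_range]
    rcases Nat.le_total t.length l.length with hc | hc
    · have hKt : K = t.length := by omega
      rw [hKt]
      have hdt : t.length + (d - t.length) = d := by omega
      have ht : t[d]? = none := by rw [List.getElem?_eq_none_iff]; omega
      simp [List.getElem?_drop, hdt, ht]
    · have hKl : K = l.length := by omega
      rcases Nat.lt_or_ge (d - K) (t.length - K) with h2 | h2
      · rw [List.getElem?_append_left (by simpa using h2)]
        have hKd : K + (d - K) = d := by omega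
        have hl : l[d]? = none := by rw [List.getElem?_eq_none_iff]; omega
        simp [List.getElem?_drop, hKd, hl]
      · rw [List.getElem?_append_right (by simpa using h2)]
        have ht : t[d]? = none := by rw [List.getElem?_eq_none_iff]; omega
        have hl : l[d]? = none := by rw [List.getElem?_eq_none_iff]; omega
        have hl2 : l[K + (d - K - (t.length - K))]? = (none : Option Int) := by
          rw [List.getElem?_eq_none_iff]; omega
        simp [List.getElem?_drop, ht, hl, hl2]

theorem foldl_max_shift (ls : List (List Int)) (a : Nat) :
    ls.foldl (fun m l => max m l.length) a = max a (ls.foldl (fun m l => max m l.length) 0) := by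
  induction ls generalizing a with
  | nil => simp
  | cons u us ih => simp only [List.foldl_cons]; rw [ih, ih (max 0 u.length)]; omega

theorem alt_foldl_length (ls : List (List Int)) (acc : List Int) :
    (ls.foldl voegToe acc).length = max acc.length (ls.foldl (fun m l => max m l.length) 0) := by
  induction ls generalizing acc with
  | nil => simp
  | cons l ls ih =>
    simp only [List.foldl_cons, ih, voegToe_length]
    rw [foldl_max_shift ls (max 0 l.length)]
    omega

theorem alt_foldl_getD (ls : List (List Int)) (acc : List Int) (d : Nat) :
    (ls.foldl voegToe acc).getD d 0 = acc.getD d 0 + colsum ls d := by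
  induction ls generalizing acc with
  | nil => simp [colsum]
  | cons l ls ih =>
    simp only [List.foldl_cons, ih, voegToe_getD, colsum, List.map_cons, List.sum_cons]
    ring

theorem inner_length (afstanden : List (List Int)) (tot : List Int) (dag : Nat) :
    (afstanden.foldl
      (fun tot loper =>
        if (dag : Int) < (loper.length : Int) then
          PySem.List.pySetD tot (dag : Int)
            (PySem.List.pyGetD tot (dag : Int) 0 + PySem.List.pyGetD loper (dag : Int) 0)
        else tot) tot).length = tot.length := by
  induction afstanden generalizing tot with
  | nil => rfl
  | cons l ls ih =>
    simp only [List.foldl_cons]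
    split
    · rw [ih]; simp [PySem.List.pySetD_natCast]
    · exact ih tot

theorem inner_getD (afstanden : List (List Int)) (tot : List Int) (dag : Nat)
    (hd : dag < tot.length) (i : Nat) :
    (afstanden.foldl
      (fun tot loper =>
        if (dag : Int) < (loper.length : Int) then
          PySem.List.pySetD tot (dag : Int)
            (PySem.List.pyGetD tot (dag : Int) 0 + PySem.List.pyGetD loper (dag : Int) 0)
        else tot) tot).getD i 0
      = if i = dag then tot.getD dag 0 + colsum afstanden dag else tot.getD i 0 := by
  induction afstanden generalizing tot with
  | nil => by_cases hi : i = dag <;> simp [colsum, hi]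
  | cons l ls ih =>
    simp only [List.foldl_cons]
    by_cases hl : (dag : Int) < (l.length : Int)
    · rw [if_pos hl]
      have hlen : dag < (PySem.List.pySetD tot (dag : Int)
          (PySem.List.pyGetD tot (dag : Int) 0 + PySem.List.pyGetD l (dag : Int) 0)).length := by
        simp [PySem.List.pySetD_natCast]; omega
      rw [ih _ hlen]
      have hset : ∀ (m : Nat), (PySem.List.pySetD tot (dag : Int)
          (PySem.List.pyGetD tot (dag : Int) 0 + PySem.List.pyGetD l (dag : Int) 0)).getD m 0
          = if m = dag then tot.getD dag 0 + l.getD dag 0 else tot.getD m 0 := by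
        intro m
        by_cases hm : m = dag
        · subst hm
          simp [PySem.List.pySetD_natCast, PySem.List.pyGetD_natCast, List.getD, hd]
        · simp [PySem.List.pySetD_natCast, PySem.List.pyGetD_natCast, List.getD, hm, Ne.symm hm]
      simp only [hset]
      by_cases hi : i = dag
      · simp only [hi, colsum, List.map_cons, List.sum_cons, if_true]; ring
      · simp [hi]
    · rw [if_neg hl]
      rw [ih _ hd]
      have hzero : l.getD dag 0 = 0 := by
        apply List.getD_eq_default
        omega
      have hc : colsum (l :: ls) dag = colsum ls dag := by
        simp only [colsum, List.map_cons, List.sum_cons, hzero, zero_add]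
      simp [hc]

theorem A_length (afstanden : List (List Int)) (n : Nat) (init : List Int) :
    ((List.range n).foldl
      (fun tot (k : Nat) =>
        afstanden.foldl
          (fun tot loper =>
            if ((k : Int)) < (loper.length : Int) then
              PySem.List.pySetD tot ((k : Int))
                (PySem.List.pyGetD tot ((k : Int)) 0 + PySem.List.pyGetD loper ((k : Int)) 0)
            else tot) tot) init).length = init.length := by
  induction n generalizing init with
  | zero => rfl
  | succ m ih =>
    rw [List.range_succ, List.foldl_append, List.foldl_cons, List.foldl_nil, inner_length, ih]

theorem outer_result (afstanden : List (List Int)) (n : Nat) (init : List Int)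
    (hn : n ≤ init.length) (i : Nat) :
    ((List.range n).foldl
      (fun tot (k : Nat) =>
        afstanden.foldl
          (fun tot loper =>
            if ((k : Int)) < (loper.length : Int) then
              PySem.List.pySetD tot ((k : Int))
                (PySem.List.pyGetD tot ((k : Int)) 0 + PySem.List.pyGetD loper ((k : Int)) 0)
            else tot) tot) init).getD i 0
      = if i < n then init.getD i 0 + colsum afstanden i else init.getD i 0 := by
  induction n with
  | zero => simp
  | succ m ih =>
    rw [List.range_succ, List.foldl_append, List.foldl_cons, List.foldl_nil]
    have hlen := A_length afstanden m init
    rw [inner_getD afstanden _ m (by rw [hlen]; omega) i]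
    by_cases hi : i = m
    · subst hi
      rw [ih (by omega) ]
      simp
    · rw [if_neg hi, ih (by omega)]
      split_ifs <;> first | rfl | omega

theorem cast_foldl_max (t : List (List Int)) (c : Nat) :
    (t.map (fun l => (l.length : Int))).foldl max (c : Int)
      = ((t.foldl (fun m l => max m l.length) c : Nat) : Int) := by
  induction t generalizing c with
  | nil => simp
  | cons u us ih =>
    simp only [List.map_cons, List.foldl_cons]
    rw [← Nat.cast_max, ih]

-- ===== VERDICT (by name: the statement is the Claim_ definition above) =====
theorem afstand_per_dag_spec : Claim_equal_afstand_per_dag := by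
  intro a _ hpre
  unfold Spec_afstand_per_dag
  cases a with
  | nil => exact absurd rfl hpre
  | cons x t =>
    set M : Nat := t.foldl (fun m l => max m l.length) x.length with hM
    have hmax : PySem.List.max? ((x :: t).map (fun a => (a.length : Int))) (fun x => x)
        = some ((M : Nat) : Int) := by
      rw [List.map_cons, PySem.List.max?_id_cons, cast_foldl_max]
    -- evaluate A
    unfold afstand_per_dag
    rw [hmax]
    simp only [PySem.List.pyRange_one, Int.sub_zero, Int.toNat_natCast, List.foldl_map]
    have hfun : (fun (tot : List Int) (k : Nat) =>
        (x :: t).foldl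
          (fun tot loper =>
            if ((0 : Int) + (k : Int)) < (loper.length : Int) then
              PySem.List.pySetD tot ((0 : Int) + (k : Int))
                (PySem.List.pyGetD tot ((0 : Int) + (k : Int)) 0
                  + PySem.List.pyGetD loper ((0 : Int) + (k : Int)) 0)
            else tot) tot)
        = (fun (tot : List Int) (k : Nat) =>
        (x :: t).foldl
          (fun tot loper =>
            if ((k : Int)) < (loper.length : Int) then
              PySem.List.pySetD tot ((k : Int))
                (PySem.List.pyGetD tot ((k : Int)) 0 + PySem.List.pyGetD loper ((k : Int)) 0)
            else tot) tot) := by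
      funext tot k; simp
    rw [hfun]
    -- compare with B via length + getD
    have hBlen : (afstand_per_dag_alt (x :: t)).length = M := by
      unfold afstand_per_dag_alt
      rw [alt_foldl_length]
      simp only [List.length_nil, List.foldl_cons, Nat.zero_max]
      rw [hM]
    have hAlen := A_length (x :: t) M (List.replicate M (0 : Int))
    apply List.ext_getElem
    · rw [hAlen, hBlen, List.length_replicate]
    · intro i h1 h2
      have hA : ∀ j : Nat, ((List.range M).foldl
          (fun tot (k : Nat) =>
            (x :: t).foldl
              (fun tot loper =>
                if ((k : Int)) < (loper.length : Int) then
                  PySem.List.pySetD tot ((k : Int))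
                    (PySem.List.pyGetD tot ((k : Int)) 0 + PySem.List.pyGetD loper ((k : Int)) 0)
                else tot) tot) (List.replicate M (0 : Int))).getD j 0
          = if j < M then colsum (x :: t) j else 0 := by
        intro j
        rw [outer_result (x :: t) M _ (by simp) j]
        by_cases hj : j < M <;> simp [hj, List.getD]
      have hB : (afstand_per_dag_alt (x :: t)).getD i 0 = colsum (x :: t) i := by
        unfold afstand_per_dag_alt
        rw [alt_foldl_getD]
        simp
      have hi : i < M := by rw [hAlen, List.length_replicate] at h1; exact h1
      have := hA i
      rw [if_pos hi] at this
      calc _ = ((List.range M).foldl _ (List.replicate M (0:Int))).getD i 0 := by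
                rw [List.getD_eq_getElem?_getD, List.getElem?_eq_getElem h1]; rfl
        _ = colsum (x :: t) i := this
        _ = (afstand_per_dag_alt (x :: t)).getD i 0 := hB.symm
        _ = _ := by rw [List.getD_eq_getElem?_getD, List.getElem?_eq_getElem h2]; rfl
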